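-- pv_equiv track=rewrite | github.com/4er65rf/177 | Ubicador de vocales.py | ubicadorDeVocales
-- ===== SOURCE A (Python) =====
-- def ubicadorDeVocales(cadena):
--
--     cadena = cadena.lower()
--
--     vocales="aeiou"
--
--     ubicaciones={vocal:[]for vocal in vocales}
--
--     for indice,letra in enumerate(cadena):
--         if letra in ubicaciones:
--             ubicaciones[letra].append(indice)
--     return ubicaciones
-- ===== SOURCE B (Python) =====
-- def ubicadorDeVocales(cadena):
--     s = cadena.lower()
--     return {v: [i for i, c in enumerate(s) if c == v] for v in "aeiou"}
-- ===== Notes on version B (the rewrite author's own statement) =====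
-- stated objective: idiomatic
-- what changed: Replaced the single position-keyed pass that mutates a pre-built dict with a dict comprehension keyed by vowel: for each of the five vowels the lowered string is scanned once collecting matching indices.
import Mathlib
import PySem

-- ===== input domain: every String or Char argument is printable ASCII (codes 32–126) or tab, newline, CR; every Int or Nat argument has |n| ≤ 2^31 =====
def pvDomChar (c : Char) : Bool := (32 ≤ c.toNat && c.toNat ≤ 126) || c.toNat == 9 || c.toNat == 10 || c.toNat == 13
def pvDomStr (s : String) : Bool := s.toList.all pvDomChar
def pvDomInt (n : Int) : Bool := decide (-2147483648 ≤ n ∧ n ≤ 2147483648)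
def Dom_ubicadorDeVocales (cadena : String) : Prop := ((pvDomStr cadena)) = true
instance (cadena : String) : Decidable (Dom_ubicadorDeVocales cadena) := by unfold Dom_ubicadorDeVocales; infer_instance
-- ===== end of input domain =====

-- B replaces A's single position-keyed pass over a pre-built vowel dict by an
-- idiomatic vowel-keyed dict comprehension (one scan of the string per vowel).


-- ===== PORT A =====
-- Python's 1-character strings (dict keys, the chars of the string) are Lean Chars;
-- the returned dict's items are converted to String keys at the return, per the type convention.
def ubicadorDeVocales (cadena : String) : List (String × List Int) :=
  let cadena' := PySem.Str.lower cadena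
  let vocales : List Char := "aeiou".toList
  let ubicaciones : PySem.Dict Char (List Int) :=
    vocales.foldl (fun d vocal => d.insert vocal []) PySem.Dict.empty
  let final :=
    (PySem.List.enumerate cadena'.toList 0).foldl
      (fun d p => if d.contains p.2 then d.modify p.2 [] (· ++ [p.1]) else d)
      ubicaciones
  final.items.map (fun p => (String.ofList [p.1], p.2))

-- ===== PORT B =====
def ubicadorDeVocales_alt (cadena : String) : List (String × List Int) :=
  let s := PySem.Str.lower cadena
  "aeiou".toList.map (fun v =>
    (String.ofList [v],
     (PySem.List.enumerate s.toList 0).filterMap (fun p => if p.2 == v then some p.1 else none)))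

-- ===== PRECONDITION & SPEC =====
def Spec_ubicadorDeVocales (cadena : String) (out : List (String × List Int)) : Prop := out = ubicadorDeVocales_alt cadena
instance (cadena : String) (out : List (String × List Int)) : Decidable (Spec_ubicadorDeVocales cadena out) := by unfold Spec_ubicadorDeVocales; infer_instance

-- ===== CLAIM (what is proved, stated in full; the proofs are below) =====
def Claim_equal_ubicadorDeVocales : Prop := ∀ (cadena : String), Dom_ubicadorDeVocales cadena → Spec_ubicadorDeVocales cadena (ubicadorDeVocales cadena)

-- ===== LEMMAS AND PROOFS =====

-- indices of l whose character equals v, in order (B's inner comprehension)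
def pvIdx (l : List (Int × Char)) (v : Char) : List Int :=
  l.filterMap (fun p => if p.2 == v then some p.1 else none)

theorem pvIdx_cons_self (i : Int) (c : Char) (rest : List (Int × Char)) :
    pvIdx ((i, c) :: rest) c = i :: pvIdx rest c := by
  simp [pvIdx]

theorem pvIdx_cons_ne {c v : Char} (i : Int) (rest : List (Int × Char)) (h : c ≠ v) :
    pvIdx ((i, c) :: rest) v = pvIdx rest v := by
  simp [pvIdx, h]

theorem pvAppCons (xs : List Int) (i : Int) (ys : List Int) :
    xs ++ i :: ys = (xs ++ [i]) ++ ys := by simp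

-- A's loop over any dict with exactly the five vowel keys appends pvIdx to each slot.
theorem pvLoopA (l : List (Int × Char)) (la le li lo lu : List Int) :
    l.foldl (fun d p => if d.contains p.2 then d.modify p.2 [] (· ++ [p.1]) else d)
      (PySem.Dict.mk [('a',la),('e',le),('i',li),('o',lo),('u',lu)])
    = PySem.Dict.mk [('a', la ++ pvIdx l 'a'), ('e', le ++ pvIdx l 'e'),
                     ('i', li ++ pvIdx l 'i'), ('o', lo ++ pvIdx l 'o'),
                     ('u', lu ++ pvIdx l 'u')] := by
  induction l generalizing la le li lo lu with
  | nil => simp [pvIdx]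
  | cons p rest ih =>
    obtain ⟨i, c⟩ := p
    simp only [List.foldl_cons]
    by_cases ha : c = 'a'
    · subst ha
      rw [pvIdx_cons_self, pvIdx_cons_ne (c := 'a') (v := 'e') i rest (by decide), pvIdx_cons_ne (c := 'a') (v := 'i') i rest (by decide), pvIdx_cons_ne (c := 'a') (v := 'o') i rest (by decide), pvIdx_cons_ne (c := 'a') (v := 'u') i rest (by decide), pvAppCons, ← ih]
      congr 1
    by_cases he : c = 'e'
    · subst he
      rw [pvIdx_cons_self, pvIdx_cons_ne (c := 'e') (v := 'a') i rest (by decide), pvIdx_cons_ne (c := 'e') (v := 'i') i rest (by decide), pvIdx_cons_ne (c := 'e') (v := 'o') i rest (by decide), pvIdx_cons_ne (c := 'e') (v := 'u') i rest (by decide), pvAppCons, ← ih]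
      congr 1
    by_cases hi : c = 'i'
    · subst hi
      rw [pvIdx_cons_self, pvIdx_cons_ne (c := 'i') (v := 'a') i rest (by decide), pvIdx_cons_ne (c := 'i') (v := 'e') i rest (by decide), pvIdx_cons_ne (c := 'i') (v := 'o') i rest (by decide), pvIdx_cons_ne (c := 'i') (v := 'u') i rest (by decide), pvAppCons, ← ih]
      congr 1
    by_cases ho : c = 'o'
    · subst ho
      rw [pvIdx_cons_self, pvIdx_cons_ne (c := 'o') (v := 'a') i rest (by decide), pvIdx_cons_ne (c := 'o') (v := 'e') i rest (by decide), pvIdx_cons_ne (c := 'o') (v := 'i') i rest (by decide), pvIdx_cons_ne (c := 'o') (v := 'u') i rest (by decide), pvAppCons, ← ih]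
      congr 1
    by_cases hu : c = 'u'
    · subst hu
      rw [pvIdx_cons_self, pvIdx_cons_ne (c := 'u') (v := 'a') i rest (by decide), pvIdx_cons_ne (c := 'u') (v := 'e') i rest (by decide), pvIdx_cons_ne (c := 'u') (v := 'i') i rest (by decide), pvIdx_cons_ne (c := 'u') (v := 'o') i rest (by decide), pvAppCons, ← ih]
      congr 1
    · rw [pvIdx_cons_ne i rest ha, pvIdx_cons_ne i rest he, pvIdx_cons_ne i rest hi,
          pvIdx_cons_ne i rest ho, pvIdx_cons_ne i rest hu, ← ih]
      congr 1
      have hc : (PySem.Dict.mk [('a',la),('e',le),('i',li),('o',lo),('u',lu)]).contains c = false := by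
        simp [PySem.Dict.contains, Ne.symm ha, Ne.symm he, Ne.symm hi, Ne.symm ho, Ne.symm hu]
      rw [hc]
      simp

-- ===== VERDICT (by name: the statement is the Claim_ definition above) =====
theorem ubicadorDeVocales_spec : Claim_equal_ubicadorDeVocales := by
  intro cadena _
  unfold Spec_ubicadorDeVocales ubicadorDeVocales ubicadorDeVocales_alt
  have h0 : ("aeiou".toList.foldl (fun d vocal => d.insert vocal ([] : List Int)) PySem.Dict.empty)
      = PySem.Dict.mk [('a',[]),('e',[]),('i',[]),('o',[]),('u',[])] := by decide
  simp only [h0, pvLoopA]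
  simp [pvIdx]
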